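-- pv_equiv track=rewrite | github.com/rishabhkjain/mmbl-track | archive/linux_main.py | findLatest
-- ===== SOURCE A (Python) =====
-- def findLatest(s, c):
--     count = 0
--     strLen = len(s)
--     for i in range(strLen-1, -1, -1):
--         if s[i] == c and count == 1:
--             return i
--         if s[i] == c:
--             count += 1
--
--     return 0
-- ===== SOURCE B (Python) =====
-- def findLatest(s, c):
--     idx = [i for i, ch in enumerate(s) if ch == c]
--     return idx[-2] if len(idx) >= 2 else 0
-- ===== Notes on version B (the rewrite author's own statement) =====
-- stated objective: simpler
-- what changed: Replaces the backward scan with a counter and early exit by a single forward pass that collects all match indices and then reads the second-to-last one directly (0 if fewer than two matches).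
import Mathlib
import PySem

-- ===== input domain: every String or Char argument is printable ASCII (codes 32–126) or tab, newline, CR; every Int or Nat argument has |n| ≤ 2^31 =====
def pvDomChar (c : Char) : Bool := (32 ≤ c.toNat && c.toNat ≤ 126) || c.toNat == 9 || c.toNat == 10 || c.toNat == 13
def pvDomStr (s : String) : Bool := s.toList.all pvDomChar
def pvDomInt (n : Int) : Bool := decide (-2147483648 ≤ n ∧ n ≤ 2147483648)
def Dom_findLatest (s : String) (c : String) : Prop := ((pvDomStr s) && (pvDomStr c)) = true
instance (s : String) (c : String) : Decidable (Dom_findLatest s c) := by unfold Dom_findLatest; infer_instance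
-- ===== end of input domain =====

-- B replaces A's backward counting scan (early exit at the second match) by a forward pass
-- collecting all match indices and reading the second-to-last directly: simpler decomposition.


-- ===== PORT A =====
-- the 'for i in range(strLen-1, -1, -1)' loop with early return; count is the loop state.
-- (the 'none' branch of pyGet? is Python's IndexError; unreachable since every i is in range)
def findLatestGo (s c : String) : List Int → Int → Int
  | [], _ => 0
  | i :: rest, count =>
    match PySem.Str.pyGet? s i with
    | none => 0
    | some ch =>
      if String.ofList [ch] == c && count == 1 then i
      else if String.ofList [ch] == c then findLatestGo s c rest (count + 1)
      else findLatestGo s c rest count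

def findLatest (s : String) (c : String) : Int :=
  findLatestGo s c (PySem.List.pyRange ((PySem.Str.len s : Int) - 1) (-1) (-1)) 0

-- ===== PORT B =====
def findLatest_alt (s : String) (c : String) : Int :=
  let idx : List Int := (PySem.List.enumerate s.toList 0).filterMap
    (fun p => if String.ofList [p.2] == c then some p.1 else none)
  if 2 ≤ idx.length then (PySem.List.pyGet? idx (-2)).getD 0 else 0

-- ===== PRECONDITION & SPEC =====
def Spec_findLatest (s : String) (c : String) (out : Int) : Prop := out = findLatest_alt s c
instance (s : String) (c : String) (out : Int) : Decidable (Spec_findLatest s c out) := by unfold Spec_findLatest; infer_instance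

-- ===== CLAIM (what is proved, stated in full; the proofs are below) =====
def Claim_equal_findLatest : Prop := ∀ (s : String) (c : String), Dom_findLatest s c → Spec_findLatest s c (findLatest s c)

-- ===== LEMMAS AND PROOFS =====
-- does position i of s hold character c?
def pvMatch (s c : String) (i : Int) : Bool :=
  match PySem.Str.pyGet? s i with
  | some ch => String.ofList [ch] == c
  | none => false

theorem pvMatch_eq (s c : String) (i : Int) (ch : Char)
    (hg : PySem.Str.pyGet? s i = some ch) :
    pvMatch s c i = (String.ofList [ch] == c) := by
  unfold pvMatch; rw [hg]

theorem findLatestGo_one (s c : String) (l : List Int)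
    (h : ∀ i ∈ l, PySem.Str.pyGet? s i ≠ none) :
    findLatestGo s c l 1 = (l.filter (pvMatch s c)).headD 0 := by
  induction l with
  | nil => rfl
  | cons i rest ih =>
    have hi := h i (by simp)
    have hrest : ∀ j ∈ rest, PySem.Str.pyGet? s j ≠ none := fun j hj => h j (by simp [hj])
    cases hg : PySem.Str.pyGet? s i with
    | none => exact absurd hg hi
    | some ch =>
      have hpm := pvMatch_eq s c i ch hg
      unfold findLatestGo
      rw [hg, List.filter_cons, hpm]
      by_cases hm : String.ofList [ch] == c
      · simp [hm]
      · simp [hm, ih hrest]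

theorem findLatestGo_zero (s c : String) (l : List Int)
    (h : ∀ i ∈ l, PySem.Str.pyGet? s i ≠ none) :
    findLatestGo s c l 0 =
      (match l.filter (pvMatch s c) with
       | _ :: j :: _ => j
       | _ => 0) := by
  induction l with
  | nil => rfl
  | cons i rest ih =>
    have hi := h i (by simp)
    have hrest : ∀ j ∈ rest, PySem.Str.pyGet? s j ≠ none := fun j hj => h j (by simp [hj])
    cases hg : PySem.Str.pyGet? s i with
    | none => exact absurd hg hi
    | some ch =>
      have hpm := pvMatch_eq s c i ch hg
      unfold findLatestGo
      rw [hg, List.filter_cons, hpm]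
      by_cases hm : String.ofList [ch] == c
      · simp only [hm, Bool.true_and, if_true]
        rw [if_neg (by decide), (by norm_num : (0:Int)+1 = 1), findLatestGo_one s c rest hrest]
        cases hfr : rest.filter (pvMatch s c) <;> simp
      · simp [hm, ih hrest]

theorem match_second (L : List Int) :
    (match L with | _ :: j :: _ => j | _ => 0) = (L[1]?).getD 0 := by
  rcases L with _ | ⟨x, _ | ⟨y, t⟩⟩ <;> simp

theorem filterMap_guard_eq_filter (s c : String) (L : List Int)
    (h : ∀ j ∈ L, (∃ ch, PySem.Str.pyGet? s j = some ch ∧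
        ((String.ofList [PySem.List.pyGetD s.toList j 'a'] == c) = (String.ofList [ch] == c)))) :
    L.filterMap (fun j => if String.ofList [PySem.List.pyGetD s.toList j 'a'] == c
        then some j else none)
      = L.filter (pvMatch s c) := by
  induction L with
  | nil => rfl
  | cons j rest ih =>
    obtain ⟨ch, hg, he⟩ := h j (by simp)
    have hrest := fun x hx => h x (List.mem_cons_of_mem _ hx)
    rw [List.filterMap_cons, List.filter_cons, pvMatch_eq s c j ch hg, he, ih hrest]
    by_cases hm : (String.ofList [ch] == c) = true <;> simp [hm]

theorem second_rev (F : List Int) :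
    (match F.reverse with | _ :: j :: _ => j | _ => 0)
      = if 2 ≤ F.length then (PySem.List.pyGet? F (-2)).getD 0 else 0 := by
  rw [match_second]
  by_cases h2 : 2 ≤ F.length
  · rw [if_pos h2, PySem.List.pyGet?_neg_ofNat F 2 (by norm_num) (by omega),
      List.getElem?_reverse (by omega), show F.length - 1 - 1 = F.length - 2 from by omega]
  · rw [if_neg h2]
    have : F.reverse.length ≤ 1 := by simp; omega
    rcases hr : F.reverse with _ | ⟨x, _ | ⟨y, t⟩⟩ <;> simp_all

-- ===== VERDICT (by name: the statement is the Claim_ definition above) =====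
theorem findLatest_spec : Claim_equal_findLatest := by
  intro s c _
  unfold Spec_findLatest findLatest findLatest_alt
  have hrange : PySem.List.pyRange ((PySem.Str.len s : Int) - 1) (-1) (-1)
      = (PySem.List.pyRange 0 (s.toList.length : Int) 1).reverse := by
    rw [PySem.List.pyRange_neg_one_eq_reverse]
    norm_num [PySem.Str.len]
  have hmem : ∀ i ∈ (PySem.List.pyRange 0 (s.toList.length : Int) 1).reverse,
      PySem.Str.pyGet? s i ≠ none := by
    intro i hi
    rw [List.mem_reverse, PySem.List.mem_pyRange_one] at hi
    simp only [PySem.Str.pyGet?_eq, PySem.Chars.pyGet?_eq_listPyGet?]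
    rw [PySem.List.pyGet?_eq_some_getElem s.toList hi.1 hi.2]
    simp
  rw [hrange, findLatestGo_zero s c _ hmem, List.filter_reverse]
  rw [PySem.List.enumerate_eq_map_pyRange s.toList 'a', List.filterMap_map]
  have hfm := filterMap_guard_eq_filter s c (PySem.List.pyRange 0 (s.toList.length : Int) 1) ?side
  · simp only [Function.comp, PySem.List.len_eq] at hfm ⊢
    refine (second_rev _).trans ?_
    rw [hfm]
  case side =>
    intro j hj
    rw [PySem.List.mem_pyRange_one] at hj
    have hget : PySem.Str.pyGet? s j = some (s.toList[j.toNat]'(by omega)) := by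
      simp only [PySem.Str.pyGet?_eq, PySem.Chars.pyGet?_eq_listPyGet?]
      exact PySem.List.pyGet?_eq_some_getElem s.toList hj.1 hj.2
    refine ⟨_, hget, ?_⟩
    rw [PySem.List.pyGetD_eq_getElem s.toList 'a' hj.1 hj.2]
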